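-- pv_equiv track=rewrite | github.com/paiml/depyler | examples/hard_sparse_encoding.py | sparse_decode
-- ===== SOURCE A (Python) =====
-- def sparse_decode(encoded: list[int], length: int) -> list[int]:
--     """Decode sparse-encoded array back to full array of given length."""
--     result: list[int] = []
--     i: int = 0
--     while i < length:
--         result.append(0)
--         i = i + 1
--     j: int = 0
--     while j < len(encoded) - 1:
--         idx: int = encoded[j]
--         val: int = encoded[j + 1]
--         if idx >= 0 and idx < length:
--             result[idx] = val
--         j = j + 2
--     return result
-- ===== SOURCE B (Python) =====
-- def sparse_decode(encoded: list[int], length: int) -> list[int]: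
--     """Decode sparse-encoded array back to full array of given length."""
--     n = len(encoded) // 2
--     result: list[int] = []
--     for i in range(length):
--         v = 0
--         for k in range(n - 1, -1, -1):
--             if encoded[2 * k] == i:
--                 v = encoded[2 * k + 1]
--                 break
--         result.append(v)
--     return result
-- ===== Notes on version B (the rewrite author's own statement) =====
-- stated objective: alternative
-- what changed: Replaces A's scatter (preallocate zeros, then mutate result[idx]=val pair by pair, last write wins) with a pure gather with no writable array or table: for each output position i it searches the pair list backwards and takes the first pair whose index equals i (equivalent to last-write-wins), defaulting to 0; the bounds guard disappears because an out-of-range index can never equal a position.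
import Mathlib
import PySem

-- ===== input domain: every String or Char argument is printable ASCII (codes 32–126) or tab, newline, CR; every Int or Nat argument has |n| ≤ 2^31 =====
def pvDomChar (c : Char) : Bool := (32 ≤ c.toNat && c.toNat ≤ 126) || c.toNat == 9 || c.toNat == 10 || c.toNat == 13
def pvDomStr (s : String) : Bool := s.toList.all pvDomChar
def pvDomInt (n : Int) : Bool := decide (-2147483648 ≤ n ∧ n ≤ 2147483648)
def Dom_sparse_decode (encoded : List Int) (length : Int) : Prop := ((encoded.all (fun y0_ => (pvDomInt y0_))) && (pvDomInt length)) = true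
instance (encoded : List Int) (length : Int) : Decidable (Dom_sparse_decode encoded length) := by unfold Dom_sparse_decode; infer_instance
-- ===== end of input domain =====

-- B replaces A's scatter-into-a-zero-array with a pure gather: each output position searches the pair list backwards for the last write to it (alternative algorithm, no writable array or table; not faster).


-- ===== PORT A =====
-- while i < length: result.append(0); i += 1
def sparse_decode_zeros (i length : Int) (result : List Int) : List Int :=
  if i < length then sparse_decode_zeros (i + 1) length (result ++ [0]) else result
termination_by (length - i).toNat
decreasing_by omega

-- while j < len(encoded) - 1: idx = encoded[j]; val = encoded[j+1]; if idx >= 0 and idx < length: result[idx] = val; j += 2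
-- (encoded[j] / encoded[j+1] are always in range here, so getD is exact; result[idx] = val is List.set, exact since the guard keeps idx inside result)
def sparse_decode_scatter (encoded : List Int) (length : Int) (j : Int) (result : List Int) : List Int :=
  if j < (encoded.length : Int) - 1 then
    let idx : Int := PySem.List.pyGetD encoded j 0
    let val : Int := PySem.List.pyGetD encoded (j + 1) 0
    sparse_decode_scatter encoded length (j + 2)
      (if idx ≥ 0 ∧ idx < length then result.set idx.toNat val else result)
  else result
termination_by ((encoded.length : Int) - j).toNat
decreasing_by omega

def sparse_decode (encoded : List Int) (length : Int) : List Int :=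
  sparse_decode_scatter encoded length 0 (sparse_decode_zeros 0 length [])

-- ===== PORT B =====
-- inner loop 'for k in range(n - 1, -1, -1): if encoded[2*k] == i: v = encoded[2*k+1]; break'
-- ported as structural recursion on the number of pairs still to inspect (k pairs left ⇒ pair k-1 is looked at first)
def sparse_decode_alt_gather (encoded : List Int) (i : Int) : Nat → Int
  | 0 => 0
  | k + 1 =>
    if PySem.List.pyGetD encoded (2 * (k : Int)) 0 = i then PySem.List.pyGetD encoded (2 * (k : Int) + 1) 0
    else sparse_decode_alt_gather encoded i k

-- n = len(encoded) // 2; [search for i in range(length)]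
def sparse_decode_alt (encoded : List Int) (length : Int) : List Int :=
  (PySem.List.pyRange 0 length 1).map (fun i => sparse_decode_alt_gather encoded i (encoded.length / 2))

-- ===== PRECONDITION & SPEC =====
def Spec_sparse_decode (encoded : List Int) (length : Int) (out : List Int) : Prop := out = sparse_decode_alt encoded length
instance (encoded : List Int) (length : Int) (out : List Int) : Decidable (Spec_sparse_decode encoded length out) := by unfold Spec_sparse_decode; infer_instance

-- ===== CLAIM =====
def Claim_equal_sparse_decode : Prop := ∀ (encoded : List Int) (length : Int), Dom_sparse_decode encoded length → Spec_sparse_decode encoded length (sparse_decode encoded length)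

-- ===== LEMMAS AND PROOFS =====

-- proof-side generalisation of the gather: search pairs m..m+k-1 backwards, with fallback f
def gatherFrom (encoded : List Int) (i : Int) (m : Nat) : Nat → Int → Int
  | 0, f => f
  | k + 1, f =>
    if PySem.List.pyGetD encoded (2 * ((m + k : Nat) : Int)) 0 = i then PySem.List.pyGetD encoded (2 * ((m + k : Nat) : Int) + 1) 0
    else gatherFrom encoded i m k f

lemma gather_eq_gatherFrom (encoded : List Int) (i : Int) : ∀ k, sparse_decode_alt_gather encoded i k = gatherFrom encoded i 0 k 0 := by
  intro k
  induction k with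
  | zero => rfl
  | succ k ih => simp [sparse_decode_alt_gather, gatherFrom, ih]

lemma gatherFrom_shift (encoded : List Int) (i : Int) (m : Nat) : ∀ (k : Nat) (f : Int),
    gatherFrom encoded i m (k + 1) f =
      gatherFrom encoded i (m + 1) k
        (if PySem.List.pyGetD encoded (2 * (m : Int)) 0 = i then PySem.List.pyGetD encoded (2 * (m : Int) + 1) 0 else f) := by
  intro k
  induction k with
  | zero => intro f; simp [gatherFrom]
  | succ k ih =>
    intro f
    have h1 : gatherFrom encoded i m (k + 1 + 1) f =
        if PySem.List.pyGetD encoded (2 * ((m + (k + 1) : Nat) : Int)) 0 = i then PySem.List.pyGetD encoded (2 * ((m + (k + 1) : Nat) : Int) + 1) 0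
        else gatherFrom encoded i m (k + 1) f := rfl
    rw [h1, ih]
    have h2 : ((m + (k + 1) : Nat) : Int) = (((m + 1) + k : Nat) : Int) := by push_cast; ring
    rw [h2]
    rfl

lemma zeros_eq (length : Int) : ∀ (i : Int) (r : List Int),
    sparse_decode_zeros i length r = r ++ List.replicate (length - i).toNat 0 := by
  intro i
  induction' hn : (length - i).toNat using Nat.strong_induction_on with n ih generalizing i
  intro r
  rw [sparse_decode_zeros]
  by_cases h : i < length
  · rw [if_pos h, ih ((length - (i + 1)).toNat) (by omega) (i + 1) rfl]
    have hn1 : n = (length - (i + 1)).toNat + 1 := by omega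
    rw [hn1, List.replicate_succ, List.append_assoc]
    rfl
  · rw [if_neg h]
    have hn0 : n = 0 := by omega
    simp [hn0]

lemma scatter_length (encoded : List Int) (length : Int) : ∀ (j : Int) (r : List Int),
    (sparse_decode_scatter encoded length j r).length = r.length := by
  intro j
  induction' hn : (((encoded.length : Int)) - j).toNat using Nat.strong_induction_on with n ih generalizing j
  intro r
  rw [sparse_decode_scatter]
  by_cases h : j < (encoded.length : Int) - 1
  · rw [if_pos h, ih (((encoded.length : Int)) - (j + 2)).toNat (by omega) (j + 2) rfl]
    split_ifs <;> simp
  · rw [if_neg h]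

-- the core invariant: position p of the scattered array equals the backward search over the remaining pairs, falling back to r[p]
lemma scatter_agree (encoded : List Int) (length : Int) : ∀ (m : Nat) (r : List Int),
    r.length = length.toNat →
    ∀ p : Nat, p < length.toNat →
      (sparse_decode_scatter encoded length (2 * (m : Int)) r)[p]? =
        some (gatherFrom encoded (p : Int) m (encoded.length / 2 - m) (r[p]?.getD 0)) := by
  intro m
  induction' hn : (encoded.length / 2 - m) using Nat.strong_induction_on with n ih generalizing m
  subst hn
  intro r hlen p hp
  rw [sparse_decode_scatter]
  by_cases h : 2 * (m : Int) < (encoded.length : Int) - 1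
  · rw [if_pos h]
    set idx : Int := PySem.List.pyGetD encoded (2 * (m : Int)) 0 with hidx
    set val : Int := PySem.List.pyGetD encoded (2 * (m : Int) + 1) 0 with hval
    set r' : List Int := if idx ≥ 0 ∧ idx < length then r.set idx.toNat val else r with hr'
    have hm : m < encoded.length / 2 := by omega
    have hr'len : r'.length = length.toNat := by
      rw [hr']; split_ifs <;> simp [hlen]
    have hcast : 2 * (m : Int) + 2 = 2 * ((m + 1 : Nat) : Int) := by push_cast; ring
    rw [hcast, ih (encoded.length / 2 - (m + 1)) (by omega) (m + 1) rfl r' hr'len p hp]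
    
    have hstep : encoded.length / 2 - m = (encoded.length / 2 - (m + 1)) + 1 := by omega
    rw [hstep, gatherFrom_shift]
    congr 2
    -- r'[p]?.getD 0 = if idx = p then val else r[p]?.getD 0
    have hpr : p < r.length := by omega
    by_cases hg : idx ≥ 0 ∧ idx < length
    · rw [hr', if_pos hg]
      by_cases he : idx = (p : Int)
      · have ht : idx.toNat = p := by omega
        simp [ht, hpr]
        rw [← hidx, ← hval, if_pos he]
      · have hne : idx.toNat ≠ p := by omega
        rw [List.getElem?_set_ne hne]
        simp
        intro hx
        rw [← hidx] at hx
        exact absurd hx he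
    · rw [hr', if_neg hg]
      have he : idx ≠ (p : Int) := by omega
      simp
      intro hx
      rw [← hidx] at hx
      exact absurd hx he
  · rw [if_neg h]
    have hz : encoded.length / 2 - m = 0 := by omega
    rw [hz]
    have hpr : p < r.length := by omega
    simp [gatherFrom, List.getElem?_eq_getElem hpr]


-- ===== VERDICT =====
theorem sparse_decode_spec : Claim_equal_sparse_decode := by
  intro encoded length _
  unfold Spec_sparse_decode sparse_decode sparse_decode_alt
  apply List.ext_getElem?
  intro p
  by_cases hp : p < length.toNat
  · have hs := scatter_agree encoded length 0 (sparse_decode_zeros 0 length [])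
      (by rw [zeros_eq]; simp) p hp
    norm_num at hs
    rw [hs]
    have hzp : (sparse_decode_zeros 0 length [])[p]?.getD 0 = 0 := by
      rw [zeros_eq]; simp [hp]
    rw [hzp]
    have hl : length = ((length.toNat : Int)) := by omega
    rw [hl, PySem.List.getElem?_map_pyRange_zero _ length.toNat p hp]
    rw [gather_eq_gatherFrom]
  · rw [List.getElem?_eq_none (by rw [scatter_length, zeros_eq]; simp; omega),
        List.getElem?_eq_none (by rw [List.length_map, PySem.List.length_pyRange_one]; omega)]
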